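-- pv_equiv track=rewrite | github.com/venpopov/subset-sum-distinct-problem | src/motzkin_greedy.py | _compute_F_for_n
-- ===== SOURCE A (Python) =====
-- from typing import List, Tuple, Dict, Set
--
-- def _compute_F_for_n(n: int, d: List[int]) -> Set[int]:
--     """
--     Compute F(n) = { sum_{i=1}^{n-2} h_i * d[i] : h is a Motzkin profile of length n }
--     where:
--       - h_0 = h_{n-1} = 0
--       - h_i >= 0
--       - |h_{i+1} - h_i| in {-1, 0, 1}
--       - we exclude the completely flat path (all h_i = 0)
--     and we only consider indices 1 <= i <= n-2 in the sum.
--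
--     Arguments:
--         n: length of the full height profile (h_0,...,h_{n-1})
--         d: 1-based list of differences, d[1..n-1] must be valid
--
--     Returns:
--         A set F(n) of all positive weighted areas > 0.
--     """
--     F: Set[int] = set()
--
--     # Depth-first search over Motzkin height profiles
--     def dfs(pos: int, h: int, s: int, ever_positive: bool) -> None:
--         """
--         pos: current position in 0..n-1, at height h = h_pos
--         s:   current weighted sum sum_{i=1}^pos h_i * d[i] (only 1 <= i <= n-2)
--         ever_positive: True if any h_i > 0 for 1 <= i <= n-2 so far
--         """
--         if pos == n - 1:
--             # Must return to 0 at the end; exclude completely flat path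
--             if h == 0 and ever_positive:
--                 if s > 0:
--                     F.add(s)
--             return
--
--         remaining = (n - 1) - pos  # steps left to reach position n-1
--
--         # Next position
--         next_pos = pos + 1
--
--         for delta in (-1, 0, 1):
--             nh = h + delta
--             if nh < 0:
--                 continue
--             # must be able to get back to 0 in "remaining" steps of step size 1
--             if nh > remaining:
--                 continue
--
--             new_s = s
--             new_ever = ever_positive
--
--             # We only accumulate weighted area for indices 1..n-2
--             if 1 <= next_pos <= n - 2:
--                 if nh > 0:
--                     new_ever = True
--                 new_s += nh * d[next_pos]
--
--             dfs(next_pos, nh, new_s, new_ever)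
--
--     # Start at position 0, height 0, sum 0, never positive yet
--     dfs(pos=0, h=0, s=0, ever_positive=False)
--     return F
-- ===== SOURCE B (Python) =====
-- from typing import List, Set
--
-- def _expand(n, d, pos, st):
--     # children at position pos of a state (h, s, ever) at position pos-1
--     h, s, ever = st
--     out = []
--     for delta in (-1, 0, 1):
--         nh = h + delta
--         if nh < 0 or nh > n - pos:
--             continue
--         ns, ne = s, ever
--         if 1 <= pos <= n - 2:
--             if nh > 0:
--                 ne = True
--             ns = s + nh * d[pos]
--         out.append((nh, ns, ne))
--     return out
--
-- def _compute_F_for_n(n: int, d: List[int]) -> Set[int]: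
--     # Forward layered DP: one pass over positions, merging duplicate
--     # (height, partial-sum, ever-positive) states at every layer.
--     states = [(0, 0, False)]
--     for pos in range(1, n):
--         nxt = [child for st in states for child in _expand(n, d, pos, st)]
--         states = list(dict.fromkeys(nxt))
--     return {s for (h, s, ever) in states if h == 0 and ever and s > 0}
-- ===== Notes on version B (the rewrite author's own statement) =====
-- stated objective: alternative
-- what changed: A's recursive DFS that walks every Motzkin height profile into a shared result set is replaced by an iterative position-by-position DP that expands a layer of (height, partial-sum, ever-positive) states and merges duplicate states at each layer.
import Mathlib
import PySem

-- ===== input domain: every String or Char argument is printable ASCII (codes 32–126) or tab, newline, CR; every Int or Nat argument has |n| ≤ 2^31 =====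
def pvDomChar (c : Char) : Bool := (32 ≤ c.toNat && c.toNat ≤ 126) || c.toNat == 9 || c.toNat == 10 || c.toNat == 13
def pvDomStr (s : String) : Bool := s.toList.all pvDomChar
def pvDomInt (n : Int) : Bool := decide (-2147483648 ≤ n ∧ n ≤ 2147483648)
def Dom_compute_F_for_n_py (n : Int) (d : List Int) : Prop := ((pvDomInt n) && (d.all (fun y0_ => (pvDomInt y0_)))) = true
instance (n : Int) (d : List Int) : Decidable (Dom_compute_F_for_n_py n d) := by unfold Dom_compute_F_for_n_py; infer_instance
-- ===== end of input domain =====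

-- B replaces A's recursive DFS over all Motzkin profiles by an iterative layered DP
-- that merges duplicate (height, partial-sum, ever-positive) states at each position
-- (objective: alternative; the proofs show the returned sets coincide, order included).

-- ===== PORT A =====
-- A's inner recursive dfs; fuel is the recursion depth n-1-pos (0 = the loop body
-- cannot recurse: every delta is pruned by nh > remaining, so returning F is exact).
def dfsA (n : Int) (d : List Int) : Nat → Int → Int → Int → Bool → List Int → List Int
  | fuel, pos, h, s, ever, F =>
    if pos = n - 1 then
      (if h = 0 ∧ ever = true then (if s > 0 then PySem.Set.add F s else F) else F)
    else
      match fuel with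
      | 0 => F
      | fuel' + 1 =>
        ([-1, 0, 1] : List Int).foldl (fun F delta =>
          let nh := h + delta
          if nh < 0 then F
          else if nh > (n - 1) - pos then F
          else
            let next_pos := pos + 1
            let new_ever := if 1 ≤ next_pos ∧ next_pos ≤ n - 2 then
                (if nh > 0 then true else ever) else ever
            let new_s := if 1 ≤ next_pos ∧ next_pos ≤ n - 2 then
                s + nh * PySem.List.pyGetD d next_pos 0 else s
            dfsA n d fuel' next_pos nh new_s new_ever F) F

def compute_F_for_n_py (n : Int) (d : List Int) : List Int :=
  dfsA n d (n - 1).toNat 0 0 0 false PySem.Set.empty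

-- ===== PORT B =====
-- children at position pos of a state (h, s, ever) sitting at position pos-1
def expandB (n : Int) (d : List Int) (pos : Int) (st : Int × Int × Bool) : List (Int × Int × Bool) :=
  ([-1, 0, 1] : List Int).flatMap (fun delta =>
    let nh := st.1 + delta
    if nh < 0 ∨ nh > n - pos then []
    else
      let ne := if 1 ≤ pos ∧ pos ≤ n - 2 then (if nh > 0 then true else st.2.2) else st.2.2
      let ns := if 1 ≤ pos ∧ pos ≤ n - 2 then st.2.1 + nh * PySem.List.pyGetD d pos 0 else st.2.1
      [(nh, ns, ne)])

def stepB (n : Int) (d : List Int) (states : List (Int × Int × Bool)) (pos : Int) :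
    List (Int × Int × Bool) :=
  PySem.List.dedup (states.flatMap (expandB n d pos))

def compute_F_for_n_py_alt (n : Int) (d : List Int) : List Int :=
  PySem.Set.ofList
    ((((PySem.List.pyRange 1 n 1).foldl (stepB n d) [(0, 0, false)]).filter
        (fun st => decide (st.1 = 0 ∧ st.2.2 = true ∧ st.2.1 > 0))).map (fun st => st.2.1))

-- ===== PRECONDITION & SPEC =====
-- Pre_ excludes exactly the inputs where Python A raises IndexError (d too short for
-- the accessed indices 1..n-2); B raises there too.
def Pre_compute_F_for_n_py (n : Int) (d : List Int) : Prop := n ≤ 2 ∨ n - 1 ≤ (d.length : Int)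
instance (n : Int) (d : List Int) : Decidable (Pre_compute_F_for_n_py n d) := by
  unfold Pre_compute_F_for_n_py; infer_instance

def pvWitness_compute_F_for_n_py : Int × List Int := (5, [0, 1, 2, 3, 4])

def Spec_compute_F_for_n_py (n : Int) (d : List Int) (out : List Int) : Prop := out = compute_F_for_n_py_alt n d
instance (n : Int) (d : List Int) (out : List Int) : Decidable (Spec_compute_F_for_n_py n d out) := by unfold Spec_compute_F_for_n_py; infer_instance

-- ===== CLAIM (what is proved, stated in full; the proofs are below) =====
def Claim_equal_compute_F_for_n_py : Prop := ∀ (n : Int) (d : List Int), Dom_compute_F_for_n_py n d → Pre_compute_F_for_n_py n d → Spec_compute_F_for_n_py n d (compute_F_for_n_py n d)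

-- ===== LEMMAS AND PROOFS =====

-- ghost: the leaf sums produced by A's dfs from a given state, in DFS order
def gsum (n : Int) (d : List Int) : Nat → Int → (Int × Int × Bool) → List Int
  | fuel, pos, st =>
    if pos = n - 1 then
      (if st.1 = 0 ∧ st.2.2 = true ∧ st.2.1 > 0 then [st.2.1] else [])
    else
      match fuel with
      | 0 => []
      | fuel' + 1 => (expandB n d (pos + 1) st).flatMap (gsum n d fuel' (pos + 1))

-- ordered-set basics
theorem pv_update_append {α : Type} [BEq α] (F a b : List α) :
    PySem.Set.update F (a ++ b) = PySem.Set.update (PySem.Set.update F a) b := by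
  simp [PySem.Set.update, List.foldl_append]

theorem pv_mem_update_left {α : Type} [BEq α] [LawfulBEq α] {y : α} {F : List α} (m : List α)
    (h : y ∈ F) : y ∈ PySem.Set.update F m := by
  induction m generalizing F with
  | nil => exact h
  | cons x m ih =>
    refine ih ?_
    unfold PySem.Set.add
    split
    · exact h
    · exact List.mem_append_left _ h

theorem pv_mem_update_right {α : Type} [BEq α] [LawfulBEq α] {y : α} {F m : List α}
    (h : y ∈ m) : y ∈ PySem.Set.update F m := by
  induction m generalizing F with
  | nil => cases h
  | cons x m ih =>
    rcases List.mem_cons.1 h with rfl | h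
    · refine pv_mem_update_left m ?_
      unfold PySem.Set.add
      split
      · next hc => simpa [PySem.Set.contains] using hc
      · simp
    · exact ih h

theorem pv_update_absorb {α : Type} [BEq α] [LawfulBEq α] {F m : List α}
    (h : ∀ y ∈ m, y ∈ F) : PySem.Set.update F m = F := by
  induction m with
  | nil => rfl
  | cons x m ih =>
    have hx : x ∈ F := h x (by simp)
    have : PySem.Set.add F x = F := by
      unfold PySem.Set.add
      rw [if_pos (by simpa [PySem.Set.contains] using hx)]
    simpa [PySem.Set.update, this] using ih (fun y hy => h y (by simp [hy]))

-- the order-preserving core: folding states through Set.add never changes the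
-- first-occurrence order of the flattened blocks
theorem pv_foldl_add_flatMap {α β : Type} [BEq α] [LawfulBEq α] [BEq β] [LawfulBEq β]
    (g : α → List β) :
    ∀ (l s : List α) (F : List β),
      PySem.Set.update F ((l.foldl PySem.Set.add s).flatMap g)
        = PySem.Set.update F (s.flatMap g ++ l.flatMap g) := by
  intro l
  induction l with
  | nil => intro s F; simp
  | cons x l ih =>
    intro s F
    by_cases hx : x ∈ s
    · have hadd : PySem.Set.add s x = s := by
        unfold PySem.Set.add
        rw [if_pos (by simpa [PySem.Set.contains] using hx)]
      have habs : PySem.Set.update (PySem.Set.update F (s.flatMap g)) (g x)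
          = PySem.Set.update F (s.flatMap g) := by
        refine pv_update_absorb (fun y hy => ?_)
        exact pv_mem_update_right (List.mem_flatMap.2 ⟨x, hx, hy⟩)
      calc PySem.Set.update F (((x :: l).foldl PySem.Set.add s).flatMap g)
          = PySem.Set.update F ((l.foldl PySem.Set.add s).flatMap g) := by
            simp [List.foldl_cons, hadd]
        _ = PySem.Set.update F (s.flatMap g ++ l.flatMap g) := ih s F
        _ = PySem.Set.update F (s.flatMap g ++ ((x :: l).flatMap g)) := by
            simp [pv_update_append, habs]
    · have hadd : PySem.Set.add s x = s ++ [x] := by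
        unfold PySem.Set.add
        rw [if_neg (by simpa [PySem.Set.contains] using hx)]
      calc PySem.Set.update F (((x :: l).foldl PySem.Set.add s).flatMap g)
          = PySem.Set.update F ((l.foldl PySem.Set.add (s ++ [x])).flatMap g) := by
            simp [List.foldl_cons, hadd]
        _ = PySem.Set.update F ((s ++ [x]).flatMap g ++ l.flatMap g) := ih (s ++ [x]) F
        _ = PySem.Set.update F (s.flatMap g ++ ((x :: l).flatMap g)) := by
            simp [pv_update_append]

theorem pv_update_dedup_flatMap {α β : Type} [BEq α] [LawfulBEq α] [BEq β] [LawfulBEq β]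
    (g : α → List β) (l : List α) (F : List β) :
    PySem.Set.update F ((PySem.List.dedup l).flatMap g) = PySem.Set.update F (l.flatMap g) := by
  have := pv_foldl_add_flatMap g l [] F
  simpa [PySem.List.dedup, PySem.Set.ofList] using this

-- a fold whose body is pointwise "update by a block" is an update by the flattened blocks
theorem pv_foldl_update {α β : Type} [BEq β]
    (f : List β → α → List β) (g : α → List β)
    (hpt : ∀ F x, f F x = PySem.Set.update F (g x)) :
    ∀ (ds : List α) (F : List β), ds.foldl f F = PySem.Set.update F (ds.flatMap g) := by
  intro ds
  induction ds with
  | nil => intro F; rfl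
  | cons x ds ih => intro F; simp [List.foldl_cons, hpt, ih, pv_update_append]

-- A's dfs is an ordered-set update by the ghost leaf-sum list
theorem pv_dfsA_eq (n : Int) (d : List Int) :
    ∀ (fuel : Nat) (pos h s : Int) (ever : Bool) (F : List Int),
      dfsA n d fuel pos h s ever F = PySem.Set.update F (gsum n d fuel pos (h, s, ever)) := by
  intro fuel
  induction fuel with
  | zero =>
    intro pos h s ever F
    rw [dfsA, gsum]
    by_cases hp : pos = n - 1
    · simp only [hp]
      by_cases h1 : h = 0 ∧ ever = true
      · by_cases h2 : s > 0
        · simp [h1, h2, PySem.Set.update]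
        · simp [h1, h2, PySem.Set.update]
      · have : ¬ (h = 0 ∧ ever = true ∧ s > 0) := fun ⟨a, b, _⟩ => h1 ⟨a, b⟩
        simp [h1, this, PySem.Set.update]
    · simp [hp, PySem.Set.update]
  | succ fuel' ih =>
    intro pos h s ever F
    rw [dfsA, gsum]
    by_cases hp : pos = n - 1
    · simp only [hp]
      by_cases h1 : h = 0 ∧ ever = true
      · by_cases h2 : s > 0
        · simp [h1, h2, PySem.Set.update]
        · simp [h1, h2, PySem.Set.update]
      · have : ¬ (h = 0 ∧ ever = true ∧ s > 0) := fun ⟨a, b, _⟩ => h1 ⟨a, b⟩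
        simp [h1, this, PySem.Set.update]
    · rw [if_neg hp, if_neg hp]
      -- the per-delta body is an update by the per-delta ghost block
      have hpt : ∀ (F : List Int) (delta : Int),
          (let nh := h + delta
           if nh < 0 then F
           else if nh > (n - 1) - pos then F
           else
             let next_pos := pos + 1
             let new_ever := if 1 ≤ next_pos ∧ next_pos ≤ n - 2 then
                 (if nh > 0 then true else ever) else ever
             let new_s := if 1 ≤ next_pos ∧ next_pos ≤ n - 2 then
                 s + nh * PySem.List.pyGetD d next_pos 0 else s
             dfsA n d fuel' next_pos nh new_s new_ever F)
          = PySem.Set.update F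
              ((let nh := h + delta
                if nh < 0 ∨ nh > n - (pos + 1) then ([] : List (Int × Int × Bool))
                else
                  let ne := if 1 ≤ pos + 1 ∧ pos + 1 ≤ n - 2 then
                      (if nh > 0 then true else ever) else ever
                  let ns := if 1 ≤ pos + 1 ∧ pos + 1 ≤ n - 2 then
                      s + nh * PySem.List.pyGetD d (pos + 1) 0 else s
                  [(nh, ns, ne)]).flatMap (gsum n d fuel' (pos + 1))) := by
        intro F delta
        by_cases hneg : h + delta < 0
        · simp [hneg, PySem.Set.update]
        · by_cases hbig : h + delta > (n - 1) - pos
          · have : h + delta > n - (pos + 1) := by omega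
            simp [hneg, hbig, this, PySem.Set.update]
          · have hbig' : ¬ h + delta > n - (pos + 1) := by omega
            simp [hneg, hbig, hbig', ih]
      rw [pv_foldl_update _ _ hpt]
      congr 1
      simp only [expandB, List.flatMap_assoc]

-- at the last position the ghost collapses to "filter the accepted states, keep their sums"
theorem pv_collect (n : Int) (d : List Int) (L : List (Int × Int × Bool)) :
    L.flatMap (gsum n d 0 (n - 1))
      = (L.filter (fun st => decide (st.1 = 0 ∧ st.2.2 = true ∧ st.2.1 > 0))).map
          (fun st => st.2.1) := by
  induction L with
  | nil => rfl
  | cons st L ih =>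
    rw [List.flatMap_cons, ih, gsum]
    by_cases hacc : st.1 = 0 ∧ st.2.2 = true ∧ st.2.1 > 0
    · simp [hacc]
    · simp [hacc]

-- the layered fold keeps the ordered set of reachable leaf sums invariant
theorem pv_fold_inv (n : Int) (d : List Int) :
    ∀ (m : Nat) (k : Int) (L : List (Int × Int × Bool)), k = n - 1 - m → 0 ≤ k →
      PySem.Set.ofList
          (((PySem.List.pyRange (k + 1) n 1).foldl (stepB n d) L).flatMap (gsum n d 0 (n - 1)))
        = PySem.Set.ofList (L.flatMap (gsum n d m k)) := by
  intro m
  induction m with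
  | zero =>
    intro k L hk _
    have h1 : ¬ k + 1 < n := by omega
    have : PySem.List.pyRange (k + 1) n 1 = [] := by
      simp [PySem.List.pyRange, h1]
    rw [this]
    simp only [List.foldl_nil]
    have hk' : k = n - 1 := by omega
    rw [hk']
  | succ m ih =>
    intro k L hk hk0
    rw [PySem.List.pyRange_one_cons (by omega)]
    rw [List.foldl_cons]
    rw [ih (k + 1) (stepB n d L (k + 1)) (by omega) (by omega)]
    show PySem.Set.ofList ((PySem.List.dedup (L.flatMap (expandB n d (k + 1)))).flatMap
        (gsum n d m (k + 1))) = _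
    rw [show (PySem.Set.ofList ((PySem.List.dedup (L.flatMap (expandB n d (k + 1)))).flatMap
        (gsum n d m (k + 1)))) = PySem.Set.update []
          ((PySem.List.dedup (L.flatMap (expandB n d (k + 1)))).flatMap (gsum n d m (k + 1))) from rfl]
    rw [pv_update_dedup_flatMap]
    congr 1
    rw [List.flatMap_assoc]
    refine List.flatMap_congr ?_
    intro st _
    rw [gsum]
    have hne : ¬ k = n - 1 := by omega
    simp [hne]

-- ===== VERDICT (by name: the statement is the Claim_ definition above) =====
theorem compute_F_for_n_py_spec : Claim_equal_compute_F_for_n_py := by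
  intro n d _ _
  unfold Spec_compute_F_for_n_py compute_F_for_n_py compute_F_for_n_py_alt
  rw [pv_dfsA_eq]
  by_cases hn : 2 ≤ n
  · have hinv := pv_fold_inv n d (n - 1).toNat 0 [(0, 0, false)] (by omega) (by omega)
    simp only [zero_add] at hinv
    rw [← pv_collect, hinv]
    show _ = PySem.Set.ofList (gsum n d (n - 1).toNat 0 (0, 0, false) ++ [])
    simp [PySem.Set.ofList, PySem.Set.update, PySem.Set.empty]
  · -- n ≤ 1: the range is empty, A's dfs produces no leaf sum, both sides are []
    have hrange : PySem.List.pyRange 1 n 1 = [] := by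
      simp [PySem.List.pyRange]; omega
    have hf : (n - 1).toNat = 0 := by omega
    rw [hrange]
    simp only [List.foldl_nil]
    rw [hf, gsum]
    by_cases h1 : (0 : Int) = n - 1
    · rw [if_pos h1]
      simp [PySem.Set.update, PySem.Set.ofList, PySem.Set.empty]
    · rw [if_neg h1]
      simp [PySem.Set.update, PySem.Set.ofList, PySem.Set.empty]
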